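-- pv_equiv track=rewrite | github.com/nlyum/ics-32-tutorial | count_even_digits.py | count_even_digits
-- ===== SOURCE A (Python) =====
-- def count_even_digits(n):
--     if n % 2 == 0:
--         even_digit = 1
--     else:
--         even_digit = 0
--     if n < 10:
--         return even_digit
--     else:
--         return even_digit + count_even_digits(n // 10)
-- ===== SOURCE B (Python) =====
-- def count_even_digits(n):
--     count = 0
--     while True:
--         if n % 2 == 0:
--             count += 1
--         if n < 10:
--             return count
--         n //= 10
-- ===== Notes on version B (the rewrite author's own statement) =====
-- stated objective: alternative
-- what changed: Replaced the recursion with an explicit iterative while-loop carrying a count accumulator (same arithmetic steps, tail-style loop instead of the call stack).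
import Mathlib
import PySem

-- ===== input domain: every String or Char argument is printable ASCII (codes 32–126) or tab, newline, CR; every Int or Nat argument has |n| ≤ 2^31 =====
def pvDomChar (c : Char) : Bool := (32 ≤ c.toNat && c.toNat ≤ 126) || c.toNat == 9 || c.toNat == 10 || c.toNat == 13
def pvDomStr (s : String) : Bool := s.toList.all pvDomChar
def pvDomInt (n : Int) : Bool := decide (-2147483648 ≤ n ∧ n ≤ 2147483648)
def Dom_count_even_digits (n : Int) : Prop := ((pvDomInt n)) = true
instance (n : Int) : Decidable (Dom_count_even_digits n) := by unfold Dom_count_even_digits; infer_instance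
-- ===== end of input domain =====

-- B replaces A's recursion by an explicit iterative loop with a count accumulator; same arithmetic, no speed claim.

-- termination helper used by both ports (cited in decreasing_by)
theorem pv_floordiv10_lt (n : Int) (h : ¬ n < 10) : (PySem.Int.floordiv n 10).toNat < n.toNat := by
  rw [PySem.Int.floordiv_eq_ediv_of_pos (by norm_num)]
  omega

-- ===== PORT A =====
def count_even_digits (n : Int) : Int :=
  let even_digit : Int := if PySem.Int.mod n 2 = 0 then 1 else 0
  if h : n < 10 then even_digit
  else even_digit + count_even_digits (PySem.Int.floordiv n 10)
termination_by n.toNat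
decreasing_by exact pv_floordiv10_lt n h

-- ===== PORT B =====
-- the while-True loop of Source B, as a tail-recursive loop over the same state (n, count)
def cedLoop (n : Int) (count : Int) : Int :=
  let count := if PySem.Int.mod n 2 = 0 then count + 1 else count
  if h : n < 10 then count
  else cedLoop (PySem.Int.floordiv n 10) count
termination_by n.toNat
decreasing_by exact pv_floordiv10_lt n h

def count_even_digits_alt (n : Int) : Int := cedLoop n 0

-- ===== PRECONDITION & SPEC =====
def Spec_count_even_digits (n : Int) (out : Int) : Prop := out = count_even_digits_alt n
instance (n : Int) (out : Int) : Decidable (Spec_count_even_digits n out) := by unfold Spec_count_even_digits; infer_instance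

-- ===== CLAIM (what is proved, stated in full; the proofs are below) =====
def Claim_equal_count_even_digits : Prop := ∀ (n : Int), Dom_count_even_digits n → Spec_count_even_digits n (count_even_digits n)

-- ===== LEMMAS AND PROOFS =====

theorem cedLoop_eq (k : Nat) : ∀ (n : Int), n.toNat ≤ k → ∀ (c : Int),
    cedLoop n c = c + count_even_digits n := by
  induction k with
  | zero =>
    intro n h c
    have hn : n < 10 := by omega
    rw [cedLoop, count_even_digits]
    simp only [hn, dif_pos]
    split <;> ring
  | succ k ih =>
    intro n h c
    rw [cedLoop, count_even_digits]
    by_cases hn : n < 10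
    · simp only [hn, dif_pos]
      split <;> ring
    · simp only [hn, dif_neg, not_false_iff]
      have hlt := pv_floordiv10_lt n hn
      rw [ih _ (by omega)]
      split <;> ring

-- ===== VERDICT (by name: the statement is the Claim_ definition above) =====
theorem count_even_digits_spec : Claim_equal_count_even_digits := by
  intro n _
  unfold Spec_count_even_digits count_even_digits_alt
  rw [cedLoop_eq n.toNat n le_rfl 0, zero_add]
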